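-- pv_equiv track=rewrite | github.com/cdeust/Cortex | mcp_server/server/http_viz_api.py | parse_single_param
-- ===== SOURCE A (Python) =====
-- def parse_single_param(path: str, key: str) -> str | None:
--     """Extract a single query parameter value from a URL path."""
--     if "?" not in path:
--         return None
--     params = path.split("?", 1)[1]
--     for p in params.split("&"):
--         if p.startswith(key + "="):
--             return p[len(key) + 1:]
--     return None
-- ===== SOURCE B (Python) =====
-- def parse_single_param(path: str, key: str) -> str | None:
--     """Extract a single query parameter value from a URL path.
--
--     Different decomposition: instead of scanning parts with a prefix test and
--     an early return, build a first-occurrence-wins lookup table once (partition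
--     each part at its first '='), then answer by a single dict lookup.
--     """
--     if "?" not in path:
--         return None
--     table = {}
--     for part in path.split("?", 1)[1].split("&"):
--         name, sep, value = part.partition("=")
--         if sep:
--             table.setdefault(name, value)
--     return table.get(key)
-- ===== Notes on version B (the rewrite author's own statement) =====
-- stated objective: alternative
-- what changed: Replaces A's scan-with-prefix-test-and-early-return by building a first-occurrence-wins lookup table (each part partitioned at its first '=') and answering with a single dict lookup.
-- outside the precondition, e.g. on parse_single_param('?a=b=c', 'a=b'): A returns 'c', B returns None
import Mathlib
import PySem

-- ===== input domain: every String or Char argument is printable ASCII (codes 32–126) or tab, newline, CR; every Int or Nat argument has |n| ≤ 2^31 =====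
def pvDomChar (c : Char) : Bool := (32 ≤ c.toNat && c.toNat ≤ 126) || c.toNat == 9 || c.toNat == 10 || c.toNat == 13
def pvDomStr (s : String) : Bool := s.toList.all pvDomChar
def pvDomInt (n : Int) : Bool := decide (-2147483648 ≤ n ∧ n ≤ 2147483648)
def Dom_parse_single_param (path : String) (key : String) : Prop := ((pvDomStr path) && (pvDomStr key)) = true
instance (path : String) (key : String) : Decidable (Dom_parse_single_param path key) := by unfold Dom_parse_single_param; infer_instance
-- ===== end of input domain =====

-- B builds a first-occurrence-wins lookup table and answers by one dict lookup,
-- instead of A's prefix-test scan with early return (alternative decomposition, same cost).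


-- ===== PORT A =====
-- the for-loop of A: first part starting with key+"=" yields the rest of that part
def pvA_scan (k : List Char) : List (List Char) → Option (List Char)
  | [] => none
  | p :: rest =>
      if PySem.Chars.startswith p (k ++ ['=']) then
        some (PySem.Chars.slice p (some ((k.length : Int) + 1)) none)
      else pvA_scan k rest

def parse_single_param (path : String) (key : String) : Option String :=
  if !(PySem.Chars.isIn ['?'] path.toList) then none
  else
    -- path.split("?", 1)[1]; under the guard the split has two pieces, so index 1 exists
    let params := (PySem.Chars.splitOnMax path.toList ['?'] 1).getD 1 []
    (pvA_scan key.toList (PySem.Chars.splitOn params ['&'])).map String.ofList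

-- ===== PORT B =====
-- part.partition("=") followed by setdefault; partition is ported by hand:
-- for the 1-char separator '=' it is exactly (takeWhile (≠ '='), the first '=', the rest)
def pvB_insert (d : PySem.Dict (List Char) (List Char)) (p : List Char) :
    PySem.Dict (List Char) (List Char) :=
  let name := p.takeWhile (fun c => c != '=')
  match p.dropWhile (fun c => c != '=') with
  | [] => d                                  -- sep == "": no '=' in the part, skip it
  | _ :: value => d.setdefault name value    -- sep == "=": first occurrence wins

def parse_single_param_alt (path : String) (key : String) : Option String :=
  if PySem.Chars.isIn ['?'] path.toList then
    let params := (PySem.Chars.splitOnMax path.toList ['?'] 1).getD 1 []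
    let table := (PySem.Chars.splitOn params ['&']).foldl pvB_insert PySem.Dict.empty
    (table.get? key.toList).map String.ofList
  else none

-- ===== PRECONDITION & SPEC =====
-- Pre_ excludes keys containing '=' (nonsensical as a query-parameter name), on which
-- A's literal prefix match and B's parsed-name lookup are both defensible and differ.
def Pre_parse_single_param (path : String) (key : String) : Prop := '=' ∉ key.toList
instance (path : String) (key : String) : Decidable (Pre_parse_single_param path key) := by
  unfold Pre_parse_single_param; infer_instance

def pvWitness_parse_single_param : String × String := ("/viz?id=7&mode=raw", "mode")

def Spec_parse_single_param (path : String) (key : String) (out : Option String) : Prop := out = parse_single_param_alt path key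
instance (path : String) (key : String) (out : Option String) : Decidable (Spec_parse_single_param path key out) := by unfold Spec_parse_single_param; infer_instance

-- ===== CLAIM (what is proved, stated in full; the proofs are below) =====
def Claim_equal_parse_single_param : Prop := ∀ (path : String) (key : String), Dom_parse_single_param path key → Pre_parse_single_param path key → Spec_parse_single_param path key (parse_single_param path key)

-- ===== LEMMAS AND PROOFS =====

-- if p starts with k ++ "=", p decomposes as k, '=', the rest
lemma pvStartswith_decomp (k p : List Char) (h : PySem.Chars.startswith p (k ++ ['=']) = true) :
    p = k ++ '=' :: p.drop (k.length + 1) := by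
  rcases (PySem.Chars.startswith_iff p (k ++ ['='])).mp h with ⟨t, ht⟩
  subst ht
  have hd : ((k ++ ['=']) ++ t).drop (k.length + 1) = t := by
    have hlen : (k ++ ['=']).length = k.length + 1 := by simp
    rw [← hlen, List.drop_left]
  simpa using hd.symm

lemma pvTakeWhile_of_no_eq (k : List Char) (hk : '=' ∉ k) (r : List Char) :
    (k ++ '=' :: r).takeWhile (fun c => c != '=') = k ∧
    (k ++ '=' :: r).dropWhile (fun c => c != '=') = '=' :: r := by
  induction k with
  | nil => simp
  | cons a as ih =>
      have ha : a ≠ '=' := fun h => hk (by simp [h])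
      have := ih (fun h => hk (List.mem_cons_of_mem _ h))
      simp [ha, this.1, this.2]

-- the lookup of the table built from `parts` equals the stored value, else A's scan
lemma pvFold_get (k : List Char) (hk : '=' ∉ k) :
    ∀ (parts : List (List Char)) (d : PySem.Dict (List Char) (List Char)),
      ((parts.foldl pvB_insert d).get? k) = (d.get? k).or (pvA_scan k parts) := by
  intro parts
  induction parts with
  | nil => intro d; simp [pvA_scan]
  | cons p rest ih =>
      intro d
      rw [List.foldl_cons, ih]
      by_cases hs : PySem.Chars.startswith p (k ++ ['=']) = true
      · -- p = k ++ '=' :: v : setdefault stores v under k; A returns v here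
        have hp := pvStartswith_decomp k p hs
        set v := p.drop (k.length + 1) with hv
        have htw := pvTakeWhile_of_no_eq k hk v
        have hstep : pvB_insert d p = d.setdefault k v := by
          rw [pvB_insert]
          rw [show p.takeWhile (fun c => c != '=') = k by rw [hp]; exact (htw).1,
              show p.dropWhile (fun c => c != '=') = '=' :: v by rw [hp]; exact (htw).2]
        have hsl : PySem.Chars.slice p (some ((k.length : Int) + 1)) none = v := by
          rw [PySem.Chars.slice_eq_listSlice,
              show ((k.length : Int) + 1) = ((k.length + 1 : Nat) : Int) by push_cast; ring,
              PySem.List.slice_from_natCast]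
        rw [hstep, PySem.Dict.get?_setdefault_self]
        simp only [pvA_scan, hs, if_pos, hsl]
        cases d.get? k <;> simp
      · -- p does not start with k ++ "=": the table entry for k is untouched
        have hstep : (pvB_insert d p).get? k = d.get? k := by
          rw [pvB_insert]
          cases hdw : p.dropWhile (fun c => c != '=') with
          | nil => rfl
          | cons c value =>
              have hc' : c = '=' := by
                have hne : p.dropWhile (fun c => c != '=') ≠ [] := by simp [hdw]
                have := List.head_dropWhile_not (fun c => c != '=') hne
                have h2 : (List.dropWhile (fun c => c != '=') p).head hne = c := by
                  simp [hdw]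
                rw [h2] at this
                simpa using this
              simp only []
              by_cases hnk : p.takeWhile (fun c => c != '=') = k
              · exfalso
                apply hs
                rw [(PySem.Chars.startswith_iff p (k ++ ['=']))]
                refine ⟨value, ?_⟩
                have := List.takeWhile_append_dropWhile (p := fun c => c != '=') (l := p)
                rw [← this, hnk, hdw, hc']
                simp
              · exact PySem.Dict.get?_setdefault_of_ne d _ (fun h => hnk h.symm)
        rw [hstep]
        simp [pvA_scan, hs]
  -- (the cons case closes both branches above)

-- ===== VERDICT (by name: the statement is the Claim_ definition above) =====
theorem parse_single_param_spec : Claim_equal_parse_single_param := by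
  intro path key _hdom hpre
  unfold Spec_parse_single_param parse_single_param parse_single_param_alt
  by_cases hq : PySem.Chars.isIn ['?'] path.toList = true
  · simp only [hq, Bool.not_true, Bool.false_eq_true, if_false]
    rw [pvFold_get key.toList hpre _ PySem.Dict.empty]
    simp [PySem.Dict.get?_empty]
  · simp [hq]
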